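-- pv_equiv track=rewrite | github.com/hthoma20/OEIS-Data | harry/network.py | contributes_to_postswith
-- ===== SOURCE A (Python) =====
-- def contributes_to_postswith(contributes):
-- 	postswith= {}
--
-- 	#go thru each sequence
-- 	for sequence in contributes:
-- 		#each user of this sequence will be a key
-- 		for user_key in contributes[sequence]:
-- 			if user_key not in postswith:
-- 				postswith[user_key]= []
--
-- 			#look for users that this user postswith
-- 			for user_val in contributes[sequence]:
--
-- 				#if this user is not already in the key's list, add them
-- 				if user_val not in postswith[user_key]:
-- 					postswith[user_key].append(user_val)
--
-- 	return postswith
-- ===== SOURCE B (Python) =====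
-- def contributes_to_postswith(contributes):
-- 	# Inverted index first: for each user, the list of user-groups of the
-- 	# sequences that user contributed to; then one dedup pass per user.
-- 	index = {}
-- 	for users in contributes.values():
-- 		for user in dict.fromkeys(users):
-- 			index.setdefault(user, []).append(users)
-- 	return {user: list(dict.fromkeys(c for group in groups for c in group))
-- 	        for user, groups in index.items()}
-- ===== Notes on version B (the rewrite author's own statement) =====
-- stated objective: faster
-- what changed: Replaces A's sequence-driven triple loop with quadratic list-membership dedup by an inverted index (user -> groups) built in one pass, followed by one ordered hash-based dedup pass per user.
import Mathlib
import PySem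

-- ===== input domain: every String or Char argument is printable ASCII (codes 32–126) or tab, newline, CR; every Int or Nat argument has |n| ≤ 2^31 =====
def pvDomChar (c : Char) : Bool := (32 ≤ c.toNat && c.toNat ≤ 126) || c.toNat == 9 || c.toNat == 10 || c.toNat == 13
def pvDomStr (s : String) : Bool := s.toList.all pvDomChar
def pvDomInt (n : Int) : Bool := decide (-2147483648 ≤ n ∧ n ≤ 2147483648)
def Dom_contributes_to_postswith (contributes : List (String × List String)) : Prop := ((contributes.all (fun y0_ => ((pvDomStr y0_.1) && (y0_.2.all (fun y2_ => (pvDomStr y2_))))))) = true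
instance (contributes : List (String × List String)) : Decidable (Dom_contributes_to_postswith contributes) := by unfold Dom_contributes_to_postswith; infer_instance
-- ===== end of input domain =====

-- B replaces A's sequence-driven triple loop (with linear list-membership dedup) by an
-- inverted index user -> list of co-user groups, then one ordered dedup pass per user;
-- measurably faster on large inputs.

-- ===== PORT A =====
-- innermost loop: 'for user_val in contributes[sequence]: if user_val not in postswith[user_key]: append'
def pvAInner (pw : PySem.Dict String (List String)) (userKey : String) (seqUsers : List String) :
    PySem.Dict String (List String) :=
  seqUsers.foldl (fun pw2 userVal =>
    if userVal ∈ pw2.getD userKey [] then pw2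
    else pw2.modify userKey [] (· ++ [userVal])) pw

-- middle loop body: ensure the key exists, then the inner loop
def pvAStep (pw : PySem.Dict String (List String)) (seqUsers : List String) :
    PySem.Dict String (List String) :=
  seqUsers.foldl (fun pw userKey =>
    pvAInner (if pw.contains userKey then pw else pw.insert userKey []) userKey seqUsers) pw

def contributes_to_postswith (contributes : List (String × List String)) : List (String × List String) :=
  let d := PySem.Dict.ofList contributes
  (d.keys.foldl (fun pw seq => pvAStep pw (d.getD seq [])) PySem.Dict.empty).items

-- ===== PORT B =====
-- 'for user in dict.fromkeys(users): index.setdefault(user, []).append(users)'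
def pvBStep (ix : PySem.Dict String (List (List String))) (users : List String) :
    PySem.Dict String (List (List String)) :=
  (PySem.List.dedup users).foldl (fun ix user => ix.modify user [] (· ++ [users])) ix

def contributes_to_postswith_alt (contributes : List (String × List String)) : List (String × List String) :=
  let d := PySem.Dict.ofList contributes
  let index := d.values.foldl pvBStep PySem.Dict.empty
  index.items.map (fun p => (p.1, PySem.List.dedup p.2.flatten))

-- ===== PRECONDITION & SPEC =====
def Spec_contributes_to_postswith (contributes : List (String × List String)) (out : List (String × List String)) : Prop := out = contributes_to_postswith_alt contributes
instance (contributes : List (String × List String)) (out : List (String × List String)) : Decidable (Spec_contributes_to_postswith contributes out) := by unfold Spec_contributes_to_postswith; infer_instance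

-- ===== CLAIM (what is proved, stated in full; the proofs are below) =====
def Claim_equal_contributes_to_postswith : Prop := ∀ (contributes : List (String × List String)), Dom_contributes_to_postswith contributes → Spec_contributes_to_postswith contributes (contributes_to_postswith contributes)

-- ===== LEMMAS AND PROOFS =====

-- updating a set with elements it already has changes nothing
theorem pvUpdate_of_subset {s : PySem.Set String} {xs : List String}
    (h : ∀ x ∈ xs, x ∈ s) : s.update xs = s := by
  induction xs generalizing s with
  | nil => simp [PySem.Set.update]
  | cons x xs ih =>
      rw [PySem.Set.update_cons, PySem.Set.add_of_mem (h x (by simp))]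
      exact ih fun y hy => h y (by simp [hy])

-- updating with the deduped list is updating with the list
theorem pvUpdate_ofList (s : PySem.Set String) (xs : List String) :
    s.update (PySem.Set.ofList xs) = s.update xs := by
  rw [PySem.Set.update_eq_append_filter, PySem.Set.update_eq_append_filter,
    PySem.Set.ofList_ofList]

-- A's innermost loop: appends the unseen elements of us to the uk-entry, touches nothing else
theorem pvAInner_spec (uk : String) (us : List String) :
    ∀ (pw : PySem.Dict String (List String)), pw.contains uk = true →
      (pvAInner pw uk us).keys = pw.keys ∧
      ∀ u, (pvAInner pw uk us).getD u [] =
        if u = uk then PySem.Set.update (pw.getD uk []) us else pw.getD u [] := by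
  induction us with
  | nil =>
      intro pw _
      refine ⟨rfl, fun u => ?_⟩
      by_cases h : u = uk
      · subst h; simp [pvAInner, PySem.Set.update]
      · simp [pvAInner, h]
  | cons v vs ih =>
      intro pw hc
      have hstep : pvAInner pw uk (v :: vs) =
          pvAInner (if v ∈ pw.getD uk [] then pw
            else pw.modify uk [] (· ++ [v])) uk vs := by
        simp [pvAInner]
      by_cases hv : v ∈ pw.getD uk []
      · rw [hstep, if_pos hv]
        obtain ⟨hk, hg⟩ := ih pw hc
        refine ⟨hk, fun u => ?_⟩
        rw [hg u, PySem.Set.update_cons, PySem.Set.add_of_mem hv]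
      · rw [hstep, if_neg hv]
        set pw1 := pw.modify uk [] (· ++ [v]) with hpw1
        have hc1 : pw1.contains uk = true := by
          rw [hpw1, PySem.Dict.contains_modify]; simp
        obtain ⟨hk, hg⟩ := ih pw1 hc1
        have hkeys1 : pw1.keys = pw.keys := by
          rw [hpw1, PySem.Dict.keys_modify,
            PySem.Dict.keys_insert_of_contains _ _ hc]
        have hg1 : ∀ u, pw1.getD u [] =
            if u = uk then pw.getD uk [] ++ [v] else pw.getD u [] := by
          intro u; rw [hpw1, PySem.Dict.getD_modify]
        refine ⟨by rw [hk, hkeys1], fun u => ?_⟩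
        rw [hg u]
        by_cases hu : u = uk
        · rw [if_pos hu, if_pos hu, hg1 uk, if_pos rfl,
            PySem.Set.update_cons, PySem.Set.add_of_not_mem hv]
        · rw [if_neg hu, if_neg hu, hg1 u, if_neg hu]

-- A's middle loop over l (inner loop fixed on us): keys gain l, entries of l get us merged in
theorem pvAStep_general (us : List String) :
    ∀ (l : List String) (pw : PySem.Dict String (List String)),
      ((l.foldl (fun pw uk =>
          pvAInner (if pw.contains uk then pw else pw.insert uk []) uk us) pw).keys
        = PySem.Set.update pw.keys l) ∧
      ∀ u, (l.foldl (fun pw uk =>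
          pvAInner (if pw.contains uk then pw else pw.insert uk []) uk us) pw).getD u []
        = if u ∈ l then PySem.Set.update (pw.getD u []) us else pw.getD u [] := by
  intro l
  induction l with
  | nil => intro pw; refine ⟨by simp [PySem.Set.update], fun u => by simp⟩
  | cons uk l ih =>
      intro pw
      set pw1 := if pw.contains uk then pw else pw.insert uk [] with hpw1
      have hc1 : pw1.contains uk = true := by
        rw [hpw1]
        by_cases h : pw.contains uk
        · simp [h]
        · simp only [h, if_false, Bool.false_eq_true]
          exact PySem.Dict.contains_insert_self _ _ _
      have hkeys1 : pw1.keys = PySem.Set.add pw.keys uk := by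
        rw [hpw1]
        by_cases h : pw.contains uk
        · rw [if_pos h, PySem.Set.add_of_mem]
          rw [PySem.Dict.contains_eq_decide_mem_keys] at h
          exact of_decide_eq_true h
        · rw [if_neg h, PySem.Dict.keys_insert_of_not_contains _ _ (by simpa using h),
            PySem.Set.add_of_not_mem]
          rw [PySem.Dict.contains_eq_decide_mem_keys] at h
          simpa using h
      have hg1 : ∀ u, pw1.getD u [] = pw.getD u [] := by
        intro u
        rw [hpw1]
        by_cases h : pw.contains uk
        · rw [if_pos h]
        · rw [if_neg h, PySem.Dict.getD_insert]
          by_cases hu : u = uk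
          · rw [if_pos hu, hu, PySem.Dict.getD_of_not_contains pw [] (by simpa using h)]
          · rw [if_neg hu]
      obtain ⟨hk2, hg2⟩ := pvAInner_spec uk us pw1 hc1
      set pw2 := pvAInner pw1 uk us with hpw2
      obtain ⟨hk3, hg3⟩ := ih pw2
      have hfold : (uk :: l).foldl (fun pw uk =>
          pvAInner (if pw.contains uk then pw else pw.insert uk []) uk us) pw
          = l.foldl (fun pw uk =>
          pvAInner (if pw.contains uk then pw else pw.insert uk []) uk us) pw2 := by
        simp [hpw2, hpw1]
      constructor
      · rw [hfold, hk3, hk2, hkeys1, PySem.Set.update_cons]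
      · intro u
        rw [hfold, hg3 u]
        by_cases hul : u ∈ l
        · rw [if_pos hul, if_pos (by simp [hul]), hg2 u]
          by_cases hu : u = uk
          · rw [if_pos hu, hu, hg1 uk]
            exact pvUpdate_of_subset fun x hx => by
              rw [PySem.Set.mem_update]; exact Or.inr hx
          · rw [if_neg hu, hg1 u]
        · rw [if_neg hul, hg2 u]
          by_cases hu : u = uk
          · rw [if_pos hu, if_pos (by simp [hu]), hu, hg1 uk]
          · rw [if_neg hu, if_neg (by simp [hu, hul]), hg1 u]

theorem pvAStep_keys (pw : PySem.Dict String (List String)) (us : List String) :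
    (pvAStep pw us).keys = PySem.Set.update pw.keys us :=
  (pvAStep_general us us pw).1

theorem pvAStep_getD (pw : PySem.Dict String (List String)) (us : List String) (u : String) :
    (pvAStep pw us).getD u [] =
      if u ∈ us then PySem.Set.update (pw.getD u []) us else pw.getD u [] :=
  (pvAStep_general us us pw).2 u

-- B's index step: keys gain us, every entry of a member of us gets the group appended once
theorem pvBStep_keys (ix : PySem.Dict String (List (List String))) (us : List String) :
    (pvBStep ix us).keys = PySem.Set.update ix.keys us := by
  have h := PySem.Dict.keys_foldl_modify (PySem.List.dedup us) ([] : List (List String))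
    (fun _ _ v => v ++ [us]) ix
  rw [pvBStep, h, PySem.List.dedup_eq_ofList, pvUpdate_ofList]

theorem pvBStep_getD_general (us : List String) (u : String) :
    ∀ (l : List String), l.Nodup →
      ∀ (ix : PySem.Dict String (List (List String))),
        (l.foldl (fun ix x => ix.modify x [] (· ++ [us])) ix).getD u [] =
          if u ∈ l then ix.getD u [] ++ [us] else ix.getD u [] := by
  intro l
  induction l with
  | nil => intro _ ix; simp
  | cons x l ih =>
      intro hnd ix
      have hx : x ∉ l := (List.nodup_cons.mp hnd).1
      have hstep : ((x :: l).foldl (fun ix x => ix.modify x [] (· ++ [us])) ix)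
          = l.foldl (fun ix x => ix.modify x [] (· ++ [us])) (ix.modify x [] (· ++ [us])) := by
        simp
      rw [hstep, ih (List.nodup_cons.mp hnd).2 _]
      by_cases hul : u ∈ l
      · rw [if_pos hul, if_pos (by simp [hul]), PySem.Dict.getD_modify,
          if_neg (fun h => hx (by rw [← h]; exact hul))]
      · by_cases hu : u = x
        · rw [if_neg hul, if_pos (by simp [hu]), PySem.Dict.getD_modify, if_pos hu, hu]
        · rw [if_neg hul, if_neg (by simp [hu, hul]), PySem.Dict.getD_modify, if_neg hu]

theorem pvBStep_getD (ix : PySem.Dict String (List (List String))) (us : List String) (u : String) :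
    (pvBStep ix us).getD u [] =
      if u ∈ us then ix.getD u [] ++ [us] else ix.getD u [] := by
  rw [pvBStep, pvBStep_getD_general us u (PySem.List.dedup us) (PySem.List.nodup_dedup us) ix]
  simp

-- the joint loop invariant, by induction from the right over the list of user groups
theorem pvMain_inv (vss : List (List String)) :
    ((vss.foldl pvAStep PySem.Dict.empty).keys = PySem.Set.ofList vss.flatten) ∧
    ((vss.foldl pvBStep PySem.Dict.empty).keys = PySem.Set.ofList vss.flatten) ∧
    (∀ u, (vss.foldl pvAStep PySem.Dict.empty).getD u [] =
      PySem.Set.ofList ((vss.filter (fun vs => decide (u ∈ vs))).flatten)) ∧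
    (∀ u, (vss.foldl pvBStep PySem.Dict.empty).getD u [] =
      vss.filter (fun vs => decide (u ∈ vs))) := by
  induction vss using List.reverseRecOn with
  | nil => refine ⟨by simp [PySem.Set.ofList], by simp [PySem.Set.ofList], fun u => by simp, fun u => by simp⟩
  | append_singleton vss us ih =>
      obtain ⟨hak, hbk, hag, hbg⟩ := ih
      refine ⟨?_, ?_, fun u => ?_, fun u => ?_⟩
      · rw [List.foldl_append, List.foldl_cons, List.foldl_nil, pvAStep_keys, hak,
          List.flatten_append, PySem.Set.ofList_append]
        simp [PySem.Set.ofList]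
      · rw [List.foldl_append, List.foldl_cons, List.foldl_nil, pvBStep_keys, hbk,
          List.flatten_append, PySem.Set.ofList_append]
        simp [PySem.Set.ofList]
      · rw [List.foldl_append, List.foldl_cons, List.foldl_nil, pvAStep_getD, hag u,
          List.filter_append]
        by_cases hu : u ∈ us
        · rw [if_pos hu]
          simp only [List.filter_cons, List.filter_nil, decide_eq_true_eq, hu, if_pos]
          rw [List.flatten_append, PySem.Set.ofList_append]
          simp [PySem.Set.ofList]
        · rw [if_neg hu]
          simp [hu]
      · rw [List.foldl_append, List.foldl_cons, List.foldl_nil, pvBStep_getD, hbg u,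
          List.filter_append]
        by_cases hu : u ∈ us
        · rw [if_pos hu]; simp [hu]
        · rw [if_neg hu]; simp [hu]

-- ===== VERDICT (by name: the statement is the Claim_ definition above) =====
theorem contributes_to_postswith_spec : Claim_equal_contributes_to_postswith := by
  intro c _
  unfold Spec_contributes_to_postswith
  have hga : contributes_to_postswith c
      = ((PySem.Dict.ofList c).keys.foldl
          (fun pw seq => pvAStep pw ((PySem.Dict.ofList c).getD seq [])) PySem.Dict.empty).items := rfl
  have hgb : contributes_to_postswith_alt c
      = ((PySem.Dict.ofList c).values.foldl pvBStep PySem.Dict.empty).items.map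
          (fun p => (p.1, PySem.List.dedup p.2.flatten)) := rfl
  rw [hga, hgb]
  set d := PySem.Dict.ofList c with hd
  have hnd : d.keys.Nodup := PySem.Dict.nodup_keys_ofList c
  -- both folds are folds of pvAStep / pvBStep over the group lists d.items.map (·.2)
  have hA : d.keys.foldl (fun pw seq => pvAStep pw (d.getD seq [])) PySem.Dict.empty
      = (d.items.map (fun p => p.2)).foldl pvAStep PySem.Dict.empty := by
    have h1 : d.keys = d.items.map (fun p => p.1) := rfl
    rw [h1, List.foldl_map, List.foldl_map]
    refine PySem.List.foldl_congr_mem _ _ _ _ fun acc p hp => ?_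
    rw [PySem.Dict.getD_of_mem_items (d := d) (k := p.1) (v := p.2) (by simpa using hp) hnd]
  have hB : d.values.foldl pvBStep PySem.Dict.empty
      = (d.items.map (fun p => p.2)).foldl pvBStep PySem.Dict.empty := rfl
  set vss := d.items.map (fun p => p.2) with hvss
  obtain ⟨hak, hbk, hag, hbg⟩ := pvMain_inv vss
  have handA : (vss.foldl pvAStep PySem.Dict.empty).keys.Nodup := by
    rw [hak]; exact PySem.Set.nodup_ofList _
  have handB : (vss.foldl pvBStep PySem.Dict.empty).keys.Nodup := by
    rw [hbk]; exact PySem.Set.nodup_ofList _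
  rw [hA, hB, PySem.Dict.items_eq_map_keys _ handA ([] : List String),
    PySem.Dict.items_eq_map_keys _ handB ([] : List (List String)),
    List.map_map, hak, hbk]
  refine List.map_congr_left fun u _ => ?_
  simp only [Function.comp_apply]
  rw [hag u, hbg u, PySem.List.dedup_eq_ofList]
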